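-- pv_equiv track=rewrite | github.com/MrHamdulay/csc3-capstone | examples/data/Assignment_4/swnrei001/piglatin.py | toEnglish_word
-- ===== SOURCE A (Python) =====
-- vowels = "aeiou"
--
-- def toEnglish_word(s):
--     if s.endswith("way"):
--         return s[:len(s)-3]
--     else:
--         s = s[:len(s) - 2]
--         begin = ""
--         count = 0
--         for i in s[::-1]:
--             if (not i.lower() in vowels):
--                 begin = i + begin
--                 count = count + 1
--             else: break
--         return begin + s[:len(s) - len(begin) - 1] #-1 to remove trailing a
-- ===== SOURCE B (Python) =====
-- vowels = "aeiou"
--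
-- def toEnglish_word(s):
--     if s.endswith("way"):
--         return s[:-3]
--     t = s[:-2]
--     j = -1
--     for k, ch in enumerate(t):
--         if ch.lower() in vowels:
--             j = k
--     return t[j + 1:] + t[:j]
-- ===== Notes on version B (the rewrite author's own statement) =====
-- stated objective: simpler
-- what changed: Replaces the backward character-accumulation loop (building the consonant prefix string one char at a time with a break) by a single forward scan that records the index of the last vowel, after which the answer is two slices t[j+1:] + t[:j].
import Mathlib
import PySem

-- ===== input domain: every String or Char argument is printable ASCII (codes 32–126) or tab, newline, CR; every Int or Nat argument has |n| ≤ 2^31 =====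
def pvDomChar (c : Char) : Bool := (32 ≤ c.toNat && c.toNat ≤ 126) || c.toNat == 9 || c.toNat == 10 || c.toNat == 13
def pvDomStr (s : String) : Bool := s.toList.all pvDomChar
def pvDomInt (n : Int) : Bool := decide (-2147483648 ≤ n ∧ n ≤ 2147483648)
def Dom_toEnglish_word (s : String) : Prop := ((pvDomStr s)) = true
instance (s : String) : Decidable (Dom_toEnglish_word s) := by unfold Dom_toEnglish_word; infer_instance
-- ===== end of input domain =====

-- B replaces A's backward char-accumulation loop by a forward last-vowel-index scan plus two slices (simpler decomposition, same cost).

-- ===== PORT A =====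
-- module constant vowels = "aeiou"
def pvVowels : List Char := "aeiou".toList

-- 'for i in s[::-1]: if not i.lower() in vowels: begin = i + begin; count = count + 1; else: break'
-- (the one-char test 'i.lower() in vowels' is membership of the lowered char in "aeiou")
def pvBeginLoop : List Char → Int → List Char → List Char × Int
  | begin, count, [] => (begin, count)
  | begin, count, i :: rest =>
      if (pvVowels.contains (PySem.Chars.lowerChar i)) = false then
        pvBeginLoop (i :: begin) (count + 1) rest
      else (begin, count)

def toEnglish_word (s : String) : String :=
  if PySem.Chars.endswith s.toList "way".toList then
    String.ofList (PySem.List.slice s.toList none (some ((s.toList.length : Int) - 3)))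
  else
    let t := PySem.List.slice s.toList none (some ((s.toList.length : Int) - 2))
    let bc := pvBeginLoop [] 0 t.reverse
    String.ofList (bc.1 ++ PySem.List.slice t none (some ((t.length : Int) - (bc.1.length : Int) - 1)))

-- ===== PORT B =====
-- 'for k, ch in enumerate(t): if ch.lower() in vowels: j = k'
def pvLastVowel : List Char → Int → Int → Int
  | [], _, j => j
  | ch :: rest, k, j =>
      pvLastVowel rest (k + 1) (if pvVowels.contains (PySem.Chars.lowerChar ch) then k else j)

def toEnglish_word_alt (s : String) : String :=
  if PySem.Chars.endswith s.toList "way".toList then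
    String.ofList (PySem.List.slice s.toList none (some (-3)))
  else
    let t := PySem.List.slice s.toList none (some (-2))
    let j := pvLastVowel t 0 (-1)
    String.ofList (PySem.List.slice t (some (j + 1)) none ++ PySem.List.slice t none (some j))

-- ===== PRECONDITION & SPEC =====
def Spec_toEnglish_word (s : String) (out : String) : Prop := out = toEnglish_word_alt s
instance (s : String) (out : String) : Decidable (Spec_toEnglish_word s out) := by unfold Spec_toEnglish_word; infer_instance

-- ===== CLAIM (what is proved, stated in full; the proofs are below) =====
def Claim_equal_toEnglish_word : Prop := ∀ (s : String), Dom_toEnglish_word s → Spec_toEnglish_word s (toEnglish_word s)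

-- ===== LEMMAS AND PROOFS =====

-- xs[:len-2] = take (len-2) (Nat subtraction), also for len < 2
theorem pvSliceLen2 (l : List Char) :
    PySem.List.slice l none (some ((l.length : Int) - 2)) = l.take (l.length - 2) := by
  rcases Nat.lt_or_ge l.length 2 with h | h
  · have hk : 0 < 2 - l.length := by omega
    have : ((l.length : Int) - 2) = -(((2 - l.length : Nat)) : Int) := by push_cast [Nat.le_of_lt h]; ring
    rw [this, PySem.List.slice_to_neg_natCast _ _ hk]
    have : l.length - (2 - l.length) = l.length - 2 := by omega
    rw [this]
  · have : ((l.length : Int) - 2) = ((l.length - 2 : Nat) : Int) := by push_cast [h]; ring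
    rw [this, PySem.List.slice_to_natCast]

-- xs[:-2] = take (len-2)
theorem pvSliceNeg2 (l : List Char) :
    PySem.List.slice l none (some (-2)) = l.take (l.length - 2) := by
  have h2 : (-2 : Int) = -(((2:Nat)) : Int) := by norm_num
  rw [h2, PySem.List.slice_to_neg_natCast _ _ (by norm_num)]

-- A's loop is takeWhile-nonvowel on the reversed list, reversed onto the accumulator
theorem pvBeginLoop_eq (r acc : List Char) (c : Int) :
    (pvBeginLoop acc c r).1 =
      (r.takeWhile (fun ch => !(pvVowels.contains (PySem.Chars.lowerChar ch)))).reverse ++ acc := by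
  induction r generalizing acc c with
  | nil => simp [pvBeginLoop]
  | cons i rest ih =>
      cases hc : pvVowels.contains (PySem.Chars.lowerChar i) with
      | false =>
          have hc' : ¬ PySem.Chars.lowerChar i ∈ pvVowels := by simpa using hc
          rw [pvBeginLoop, if_pos hc, ih, List.takeWhile_cons]
          simp [hc']
      | true =>
          have hc' : PySem.Chars.lowerChar i ∈ pvVowels := by simpa using hc
          rw [pvBeginLoop, if_neg (by simp [hc']), List.takeWhile_cons]
          simp [hc']

-- B's scan leaves j unchanged over a vowel-free list
theorem pvLastVowel_noVowel (t : List Char) (k j : Int)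
    (h : ∀ c ∈ t, pvVowels.contains (PySem.Chars.lowerChar c) = false) :
    pvLastVowel t k j = j := by
  induction t generalizing k j with
  | nil => rfl
  | cons c rest ih =>
      have hc := h c (by simp)
      rw [pvLastVowel, if_neg (by rw [hc]; simp)]
      exact ih _ _ (fun x hx => h x (by simp [hx]))

-- B's scan finds the position of the last vowel
theorem pvLastVowel_split (p : List Char) (v : Char) (q : List Char) (k j : Int)
    (hv : pvVowels.contains (PySem.Chars.lowerChar v) = true)
    (hq : ∀ c ∈ q, pvVowels.contains (PySem.Chars.lowerChar c) = false) :
    pvLastVowel (p ++ v :: q) k j = k + p.length := by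
  induction p generalizing k j with
  | nil =>
      rw [List.nil_append, pvLastVowel, if_pos hv, pvLastVowel_noVowel q (k+1) k hq]
      simp
  | cons c rest ih =>
      rw [List.cons_append, pvLastVowel, ih]
      push_cast [List.length_cons]
      ring

-- the two else-branches agree, for any list t (= the chars of s[:-2])
theorem pvCore (t : List Char) :
    (pvBeginLoop [] 0 t.reverse).1 ++
        PySem.List.slice t none
          (some ((t.length : Int) - (((pvBeginLoop [] 0 t.reverse).1.length : Int)) - 1)) =
      PySem.List.slice t (some (pvLastVowel t 0 (-1) + 1)) none ++
        PySem.List.slice t none (some (pvLastVowel t 0 (-1))) := by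
  rw [pvBeginLoop_eq, List.append_nil]
  cases hd : t.reverse.dropWhile (fun ch => !(pvVowels.contains (PySem.Chars.lowerChar ch))) with
  | nil =>
      have htake : t.reverse.takeWhile (fun ch => !(pvVowels.contains (PySem.Chars.lowerChar ch))) = t.reverse := by
        have h := List.takeWhile_append_dropWhile
          (p := fun ch => !(pvVowels.contains (PySem.Chars.lowerChar ch))) (l := t.reverse)
        rw [hd, List.append_nil] at h
        exact h
      have hnov : ∀ c ∈ t, pvVowels.contains (PySem.Chars.lowerChar c) = false := by
        intro c hc
        have hmem : c ∈ t.reverse.takeWhile (fun ch => !(pvVowels.contains (PySem.Chars.lowerChar ch))) := by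
          rw [htake]; simpa using hc
        simpa using List.mem_takeWhile_imp hmem
      rw [pvLastVowel_noVowel t 0 (-1) hnov, htake, List.reverse_reverse]
      have h1 : ((t.length : Int) - (t.length : Int) - 1) = -1 := by ring
      have h2 : ((-1 : Int) + 1) = 0 := by ring
      rw [h1, h2]
      simp [PySem.List.slice_none_none]
  | cons v p' =>
      have hne : t.reverse.dropWhile (fun ch => !(pvVowels.contains (PySem.Chars.lowerChar ch))) ≠ [] := by
        rw [hd]; exact List.cons_ne_nil _ _
      have hhead : (t.reverse.dropWhile (fun ch => !(pvVowels.contains (PySem.Chars.lowerChar ch)))).head hne = v := by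
        have h1 : (t.reverse.dropWhile (fun ch => !(pvVowels.contains (PySem.Chars.lowerChar ch)))).head? = some v := by
          rw [hd]; rfl
        have h2 := List.head?_eq_some_head hne
        rw [h2] at h1
        exact Option.some.inj h1
      have hv : pvVowels.contains (PySem.Chars.lowerChar v) = true := by
        have h3 := List.head_dropWhile_not (fun ch => !(pvVowels.contains (PySem.Chars.lowerChar ch))) hne
        rw [hhead] at h3
        simpa using h3
      have hsplit : t.reverse =
          t.reverse.takeWhile (fun ch => !(pvVowels.contains (PySem.Chars.lowerChar ch))) ++ v :: p' := by
        conv_lhs => rw [← List.takeWhile_append_dropWhile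
          (p := fun ch => !(pvVowels.contains (PySem.Chars.lowerChar ch))) (l := t.reverse), hd]
      have ht : t = p'.reverse ++ v ::
          (t.reverse.takeWhile (fun ch => !(pvVowels.contains (PySem.Chars.lowerChar ch)))).reverse := by
        have h := congrArg List.reverse hsplit
        simpa [List.reverse_append] using h
      set q := (t.reverse.takeWhile (fun ch => !(pvVowels.contains (PySem.Chars.lowerChar ch)))).reverse with hqdef
      set p := p'.reverse with hpdef
      have hq : ∀ c ∈ q, pvVowels.contains (PySem.Chars.lowerChar c) = false := by
        intro c hc
        have hmem : c ∈ t.reverse.takeWhile (fun ch => !(pvVowels.contains (PySem.Chars.lowerChar ch))) := by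
          rw [hqdef] at hc; simpa using hc
        simpa using List.mem_takeWhile_imp hmem
      have hj : pvLastVowel t 0 (-1) = (p.length : Int) := by
        rw [ht]
        rw [pvLastVowel_split p v q 0 (-1) hv hq]
        ring
      have hlen : t.length = p.length + 1 + q.length := by
        rw [ht]; simp; omega
      have harg : ((t.length : Int) - (q.length : Int) - 1) = ((p.length : Nat) : Int) := by
        rw [hlen]; push_cast; ring
      have harg2 : ((p.length : Int) + 1) = (((p.length + 1 : Nat)) : Int) := by push_cast; ring
      rw [hj, harg, harg2, PySem.List.slice_to_natCast, PySem.List.slice_from_natCast]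
      have hdrop : t.drop (p.length + 1) = q := by
        rw [ht]
        have hpv : p ++ v :: q = (p ++ [v]) ++ q := by simp
        rw [hpv]
        have hl : (p ++ [v]).length = p.length + 1 := by simp
        rw [← hl]
        exact List.drop_left
      have htakep : t.take p.length = p := by
        rw [ht]
        exact List.take_left
      rw [hdrop, htakep]

-- ===== VERDICT (by name: the statement is the Claim_ definition above) =====
theorem toEnglish_word_spec : Claim_equal_toEnglish_word := by
  intro s _
  unfold Spec_toEnglish_word toEnglish_word toEnglish_word_alt
  cases hw : PySem.Chars.endswith s.toList "way".toList with
  | true =>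
      rw [if_pos rfl, if_pos rfl]
      have hsuf : "way".toList <:+ s.toList := (PySem.Chars.endswith_iff _ _).mp hw
      have hlen : 3 ≤ s.toList.length := by
        have := hsuf.length_le
        simpa using this
      have h1 : ((s.toList.length : Int) - 3) = ((s.toList.length - 3 : Nat) : Int) := by
        push_cast [hlen]; ring
      have h2 : (-3 : Int) = -(((3:Nat)) : Int) := by norm_num
      rw [h1, h2, PySem.List.slice_to_natCast, PySem.List.slice_to_neg_natCast _ _ (by norm_num)]
  | false =>
      rw [if_neg (by simp), if_neg (by simp)]
      rw [pvSliceLen2, pvSliceNeg2]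
      exact congrArg String.ofList (pvCore (s.toList.take (s.toList.length - 2)))
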